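-- pv_equiv track=rewrite | github.com/unearth4334/vast_api | app/api/downloads.py | extract_commands_from_resource
-- ===== SOURCE A (Python) =====
-- def extract_commands_from_resource(resource):
--     """Extract bash commands from resource's download_command field with associated comments"""
--     # The ResourceParser already extracted the download_command
--     download_command = resource.get('download_command', '')
--
--     if not download_command:
--         return []
--
--     # Split by newlines and handle line continuations (\)
--     lines = download_command.split('\n')
--     commands = []
--     current_command = []
--     current_comment = None
--
--     for line in lines:
--         line = line.strip()
--         if not line:
--             continue
--
--         # Check if this is a comment line
--         if line.startswith('#'):
--             # Store the comment for the next command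
--             comment_text = line[1:].strip()
--             if comment_text:  # Only store non-empty comments
--                 current_comment = comment_text
--             continue
--
--         # This is a command line
--         if line.endswith('\\'):
--             current_command.append(line[:-1].strip())
--         else:
--             current_command.append(line)
--             full_command = ' '.join(current_command)
--             # Store command with its associated comment
--             commands.append({
--                 'command': full_command,
--                 'comment': current_comment
--             })
--             current_command = []
--             current_comment = None  # Reset comment after use
--
--     # Handle any remaining command
--     if current_command:
--         full_command = ' '.join(current_command)
--         commands.append({
--             'command': full_command,
--             'comment': current_comment
--         })
--
--     return commands
-- ===== SOURCE B (Python) =====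
-- def extract_commands_from_resource(resource):
--     """Extract bash commands from resource's download_command field with associated comments"""
--     download_command = resource.get('download_command', '')
--     if not download_command:
--         return []
--     # Pass 1: tokenize into ('comment', text) / ('command', joined-fragments) tokens
--     tokens = []
--     frags = []
--     for raw in download_command.split('\n'):
--         line = raw.strip()
--         if not line:
--             continue
--         if line.startswith('#'):
--             text = line[1:].strip()
--             if text:
--                 tokens.append(('comment', text))
--         elif line.endswith('\\'):
--             frags.append(line[:-1].strip())
--         else:
--             frags.append(line)
--             tokens.append(('command', ' '.join(frags)))
--             frags = []
--     if frags:
--         tokens.append(('command', ' '.join(frags)))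
--     # Pass 2: assemble tokens into the result, carrying a pending comment
--     result = []
--     pending = None
--     for kind, text in tokens:
--         if kind == 'comment':
--             pending = text
--         else:
--             result.append({'command': text, 'comment': pending})
--             pending = None
--     return result
-- ===== Notes on version B (the rewrite author's own statement) =====
-- stated objective: alternative
-- what changed: Replaces A's single interleaved accumulator loop with a two-pass tokenize-then-assemble decomposition: pass one turns lines into comment/command tokens (folding backslash continuations into one command token), pass two pairs each command token with the pending comment.
import Mathlib
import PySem

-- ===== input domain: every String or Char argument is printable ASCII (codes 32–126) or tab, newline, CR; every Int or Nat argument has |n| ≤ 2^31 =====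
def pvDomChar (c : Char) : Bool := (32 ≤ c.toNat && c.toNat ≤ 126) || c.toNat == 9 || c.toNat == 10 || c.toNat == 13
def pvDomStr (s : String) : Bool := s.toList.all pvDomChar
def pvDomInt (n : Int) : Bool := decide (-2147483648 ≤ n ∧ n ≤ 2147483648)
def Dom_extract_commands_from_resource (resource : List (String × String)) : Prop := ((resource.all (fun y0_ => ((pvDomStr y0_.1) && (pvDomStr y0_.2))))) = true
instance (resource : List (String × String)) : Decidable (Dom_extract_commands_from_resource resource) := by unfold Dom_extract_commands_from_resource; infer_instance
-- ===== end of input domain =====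

-- B replaces A's single interleaved accumulator loop by a tokenize-then-assemble two-pass decomposition (objective: alternative, same cost).

-- ===== PORT A =====
-- A's single loop: state (commands, current_command, current_comment)
def pvA_loop : List String → List (List (String × Option String)) → List String → Option String →
    (List (List (String × Option String)) × List String × Option String)
  | [], cmds, cur, com => (cmds, cur, com)
  | l :: rest, cmds, cur, com =>
    let line := PySem.Str.strip l
    if line = "" then pvA_loop rest cmds cur com
    else if PySem.Str.startswith line "#" then
      let t := PySem.Str.strip (PySem.Str.slice line (some 1) none)
      if t = "" then pvA_loop rest cmds cur com
      else pvA_loop rest cmds cur (some t)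
    else if PySem.Str.endswith line "\\" then
      pvA_loop rest cmds (cur ++ [PySem.Str.strip (PySem.Str.slice line none (some (-1)))]) com
    else
      pvA_loop rest (cmds ++ [[("command", some (PySem.Str.join " " (cur ++ [line]))), ("comment", com)]]) [] none

def extract_commands_from_resource (resource : List (String × String)) : List (List (String × Option String)) :=
  let download_command := (PySem.Dict.mk resource).getD "download_command" ""
  if download_command = "" then []
  else
    let lines := (PySem.Str.split? download_command "\n").getD []
    let r := pvA_loop lines [] [] none
    if r.2.1 ≠ [] then r.1 ++ [[("command", some (PySem.Str.join " " r.2.1)), ("comment", r.2.2)]]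
    else r.1

-- ===== PORT B =====
-- B pass 1: tokenize the lines into ("comment", text) / ("command", joined) tokens; state (tokens, frags)
def pvB_tok : List String → List (String × String) → List String → (List (String × String) × List String)
  | [], toks, frags => (toks, frags)
  | l :: rest, toks, frags =>
    let line := PySem.Str.strip l
    if line = "" then pvB_tok rest toks frags
    else if PySem.Str.startswith line "#" then
      let t := PySem.Str.strip (PySem.Str.slice line (some 1) none)
      if t = "" then pvB_tok rest toks frags
      else pvB_tok rest (toks ++ [("comment", t)]) frags
    else if PySem.Str.endswith line "\\" then
      pvB_tok rest toks (frags ++ [PySem.Str.strip (PySem.Str.slice line none (some (-1)))])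
    else
      pvB_tok rest (toks ++ [("command", PySem.Str.join " " (frags ++ [line]))]) []

-- B pass 2: assemble tokens carrying a pending comment
def pvB_asm : List (String × String) → List (List (String × Option String)) → Option String →
    List (List (String × Option String))
  | [], out, _ => out
  | (kind, text) :: rest, out, pending =>
    if kind = "comment" then pvB_asm rest out (some text)
    else pvB_asm rest (out ++ [[("command", some text), ("comment", pending)]]) none

def extract_commands_from_resource_alt (resource : List (String × String)) : List (List (String × Option String)) :=
  let download_command := (PySem.Dict.mk resource).getD "download_command" ""
  if download_command = "" then []
  else
    let t := pvB_tok ((PySem.Str.split? download_command "\n").getD []) [] []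
    let tokens := if t.2 ≠ [] then t.1 ++ [("command", PySem.Str.join " " t.2)] else t.1
    pvB_asm tokens [] none

-- ===== PRECONDITION & SPEC =====
def Spec_extract_commands_from_resource (resource : List (String × String)) (out : List (List (String × Option String))) : Prop := out = extract_commands_from_resource_alt resource
instance (resource : List (String × String)) (out : List (List (String × Option String))) : Decidable (Spec_extract_commands_from_resource resource out) := by unfold Spec_extract_commands_from_resource; infer_instance

-- ===== CLAIM (what is proved, stated in full; the proofs are below) =====
def Claim_equal_extract_commands_from_resource : Prop := ∀ (resource : List (String × String)), Dom_extract_commands_from_resource resource → Spec_extract_commands_from_resource resource (extract_commands_from_resource resource)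

-- ===== LEMMAS AND PROOFS =====

-- pass-1 tokens accumulate on the left
lemma pvB_tok_acc (lines : List String) (toks : List (String × String)) (frags : List String) :
    pvB_tok lines toks frags = (toks ++ (pvB_tok lines [] frags).1, (pvB_tok lines [] frags).2) := by
  induction lines generalizing toks frags with
  | nil => simp [pvB_tok]
  | cons l rest ih =>
    simp only [pvB_tok, List.nil_append]
    split_ifs with h1 h2 h3 h4
    · exact ih toks frags
    · exact ih toks frags
    · rw [ih (toks ++ _) frags, ih [_] frags]; simp
    · exact ih toks _
    · rw [ih (toks ++ _) [], ih [_] []]; simp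

-- pass-2 output accumulates on the left
lemma pvB_asm_acc (toks : List (String × String)) (out : List (List (String × Option String))) (p : Option String) :
    pvB_asm toks out p = out ++ pvB_asm toks [] p := by
  induction toks generalizing out p with
  | nil => simp [pvB_asm]
  | cons t rest ih =>
    obtain ⟨k, s⟩ := t
    simp only [pvB_asm, List.nil_append]
    split_ifs with h
    · exact ih out _
    · rw [ih (out ++ _) none, ih [_] none]; simp

-- one assembly step per token kind
lemma pvB_asm_comment (t : String) (X : List (String × String)) (p : Option String) :
    pvB_asm (("comment", t) :: X) [] p = pvB_asm X [] (some t) := by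
  simp [pvB_asm]

lemma pvB_asm_command (c : String) (X : List (String × String)) (p : Option String) :
    pvB_asm (("command", c) :: X) [] p
      = [("command", some c), ("comment", p)] :: pvB_asm X [] none := by
  simp only [pvB_asm, List.nil_append]
  rw [if_neg (by decide), pvB_asm_acc]
  simp

-- the heart: A's loop + final flush equals tokenize + flush + assemble, from any shared state
lemma pvKey (lines : List String) (cmds : List (List (String × Option String))) (cur : List String) (com : Option String) :
    (if (pvA_loop lines cmds cur com).2.1 ≠ [] then
        (pvA_loop lines cmds cur com).1 ++
          [[("command", some (PySem.Str.join " " (pvA_loop lines cmds cur com).2.1)),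
            ("comment", (pvA_loop lines cmds cur com).2.2)]]
      else (pvA_loop lines cmds cur com).1)
    = cmds ++ pvB_asm
        (if (pvB_tok lines [] cur).2 ≠ [] then
            (pvB_tok lines [] cur).1 ++ [("command", PySem.Str.join " " (pvB_tok lines [] cur).2)]
          else (pvB_tok lines [] cur).1) [] com := by
  induction lines generalizing cmds cur com with
  | nil =>
    simp only [pvA_loop, pvB_tok]
    by_cases h : cur = [] <;> simp [h, pvB_asm]
  | cons l rest ih =>
    simp only [pvA_loop, pvB_tok, List.nil_append]
    by_cases h1 : PySem.Str.strip l = ""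
    · simp only [if_pos h1]; exact ih cmds cur com
    · simp only [if_neg h1]
      by_cases h2 : PySem.Str.startswith (PySem.Str.strip l) "#" = true
      · simp only [if_pos h2]
        by_cases h3 : PySem.Str.strip (PySem.Str.slice (PySem.Str.strip l) (some 1) none) = ""
        · simp only [if_pos h3]; exact ih cmds cur com
        · simp only [if_neg h3]
          rw [ih cmds cur (some _), pvB_tok_acc rest [("comment", _)] cur]
          by_cases hf : (pvB_tok rest [] cur).2 = [] <;>
            simp [hf, pvB_asm_comment]
      · simp only [if_neg h2]
        by_cases h4 : PySem.Str.endswith (PySem.Str.strip l) "\\" = true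
        · simp only [if_pos h4]; exact ih cmds _ com
        · simp only [if_neg h4]
          rw [ih (cmds ++ _) [] none, pvB_tok_acc rest [("command", _)] []]
          by_cases hf : (pvB_tok rest [] []).2 = [] <;>
            simp [hf, pvB_asm_command]

-- ===== VERDICT (by name: the statement is the Claim_ definition above) =====
theorem extract_commands_from_resource_spec : Claim_equal_extract_commands_from_resource := by
  intro resource _
  unfold Spec_extract_commands_from_resource extract_commands_from_resource extract_commands_from_resource_alt
  by_cases h : (PySem.Dict.mk resource).getD "download_command" "" = ""
  · simp [h]
  · simp only [if_neg h]
    simpa using pvKey ((PySem.Str.split? ((PySem.Dict.mk resource).getD "download_command" "")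
      "\n").getD []) [] [] none
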